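-- pv_equiv track=rewrite | github.com/Sanket117/DefiEngineering | main.py | parse_compound_action
-- ===== SOURCE A (Python) =====
-- COMPOUND_V3_CONTRACTS = {
--     'cUSDCv3': '0xc3d688B66703497DAA19211EEdff47f25384cdc3'
-- }
--
-- COMPOUND_V2_FUNCTIONS = {
--     'mint': '0xa0712d68',           # mint(uint256)
--     'redeem': '0xdb006a75',        # redeem(uint256)
--     'redeemUnderlying': '0x852a12e3',  # redeemUnderlying(uint256)
--     'borrow': '0xc5ebeaec',        # borrow(uint256)
--     'repayBorrow': '0x0e752702',   # repayBorrow(uint256)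
--     'repayBorrowBehalf': '0x2608f818',  # repayBorrowBehalf(address,uint256)
--     'liquidateBorrow': '0xf5e3c462'     # liquidateBorrow(address,uint256,address)
-- }
--
-- COMPOUND_V3_FUNCTIONS = {
--     'supply': '0xf2b9fdb8',        # supply(address,uint256)
--     'withdraw': '0xf3fef3a3',      # withdraw(address,uint256)
--     'borrow': '0x4b8a3529',       # Different signature for V3
--     'repay': '0x1ededc91'         # Different signature for V3
-- }
--
-- def parse_compound_action(input_data, contract_address):
--     """Parse the function signature to determine action type"""
--     if len(input_data) < 10:
--         return None
--
--     function_sig = input_data[:10].lower()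
--
--     # Check if it's a V3 contract
--     if contract_address.lower() in [addr.lower() for addr in COMPOUND_V3_CONTRACTS.values()]:
--         if function_sig == COMPOUND_V3_FUNCTIONS['supply']:
--             return 'supply'
--         elif function_sig == COMPOUND_V3_FUNCTIONS['withdraw']:
--             return 'withdraw'
--         elif function_sig == COMPOUND_V3_FUNCTIONS['borrow']:
--             return 'borrow'
--         elif function_sig == COMPOUND_V3_FUNCTIONS['repay']:
--             return 'repay'
--     else:
--         # V2 contract
--         if function_sig == COMPOUND_V2_FUNCTIONS['mint']:
--             return 'supply'  # mint = supply in V2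
--         elif function_sig in [COMPOUND_V2_FUNCTIONS['redeem'], COMPOUND_V2_FUNCTIONS['redeemUnderlying']]:
--             return 'redeem'
--         elif function_sig == COMPOUND_V2_FUNCTIONS['borrow']:
--             return 'borrow'
--         elif function_sig in [COMPOUND_V2_FUNCTIONS['repayBorrow'], COMPOUND_V2_FUNCTIONS['repayBorrowBehalf']]:
--             return 'repay'
--         elif function_sig == COMPOUND_V2_FUNCTIONS['liquidateBorrow']:
--             return 'liquidation'
--
--     return None
-- ===== SOURCE B (Python) =====
-- COMPOUND_V3_CONTRACTS = {
--     'cUSDCv3': '0xc3d688B66703497DAA19211EEdff47f25384cdc3'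
-- }
--
-- COMPOUND_V2_FUNCTIONS = {
--     'mint': '0xa0712d68',
--     'redeem': '0xdb006a75',
--     'redeemUnderlying': '0x852a12e3',
--     'borrow': '0xc5ebeaec',
--     'repayBorrow': '0x0e752702',
--     'repayBorrowBehalf': '0x2608f818',
--     'liquidateBorrow': '0xf5e3c462'
-- }
--
-- COMPOUND_V3_FUNCTIONS = {
--     'supply': '0xf2b9fdb8',
--     'withdraw': '0xf3fef3a3',
--     'borrow': '0x4b8a3529',
--     'repay': '0x1ededc91'
-- }
--
--
-- def _function_name(table, sig):
--     """Reverse lookup: scan the functions table for the name whose selector is sig."""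
--     for name, selector in table.items():
--         if selector == sig:
--             return name
--     return None
--
--
-- def _v2_action(name):
--     """Classify a V2 function name into an action by its naming convention."""
--     if name is None:
--         return None
--     if name == 'mint':
--         return 'supply'
--     if name.startswith('redeem'):
--         return 'redeem'
--     if name.startswith('repay'):
--         return 'repay'
--     if name == 'liquidateBorrow':
--         return 'liquidation'
--     return name  # 'borrow' already names its action
--
--
-- def parse_compound_action(input_data, contract_address):
--     """Parse the function signature to determine action type.
--
--     Works in two stages: reverse-lookup the selector to the function NAME in the
--     appropriate version's table, then derive the action from the name (V3 names
--     already are actions; V2 names classify by prefix)."""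
--     if len(input_data) < 10:
--         return None
--     function_sig = input_data[:10].lower()
--     if any(addr.lower() == contract_address.lower()
--            for addr in COMPOUND_V3_CONTRACTS.values()):
--         return _function_name(COMPOUND_V3_FUNCTIONS, function_sig)
--     return _v2_action(_function_name(COMPOUND_V2_FUNCTIONS, function_sig))
-- ===== Notes on version B (the rewrite author's own statement) =====
-- stated objective: alternative
-- what changed: Instead of A's hard-wired elif chains mapping selector literals straight to action strings, B works in two stages: it reverse-looks-up the selector to its function NAME by scanning the version's functions table, then derives the action from the name (V3 names are the actions; V2 names are classified by prefix rules like startswith('redeem')/'repay'), so no selector-to-action pairing is written out anywhere.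
import Mathlib
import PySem

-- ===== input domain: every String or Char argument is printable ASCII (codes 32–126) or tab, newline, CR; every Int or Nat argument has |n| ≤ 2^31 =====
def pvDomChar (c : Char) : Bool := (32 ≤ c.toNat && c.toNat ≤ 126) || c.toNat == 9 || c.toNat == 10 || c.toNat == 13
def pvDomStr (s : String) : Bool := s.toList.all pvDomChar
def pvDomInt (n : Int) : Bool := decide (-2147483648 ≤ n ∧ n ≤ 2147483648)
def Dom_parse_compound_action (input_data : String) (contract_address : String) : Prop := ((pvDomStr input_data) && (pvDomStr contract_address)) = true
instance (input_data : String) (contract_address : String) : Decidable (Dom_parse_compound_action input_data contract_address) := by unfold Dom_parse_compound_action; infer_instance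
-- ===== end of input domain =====

-- B replaces A's literal elif chains by a reverse selector-to-name table scan followed
-- by a name-to-action classification (objective: alternative decomposition).

-- ===== PORT A =====
def COMPOUND_V3_CONTRACTS : PySem.Dict String String :=
  PySem.Dict.ofList [("cUSDCv3", "0xc3d688B66703497DAA19211EEdff47f25384cdc3")]

def COMPOUND_V2_FUNCTIONS : PySem.Dict String String :=
  PySem.Dict.ofList [("mint", "0xa0712d68"), ("redeem", "0xdb006a75"),
    ("redeemUnderlying", "0x852a12e3"), ("borrow", "0xc5ebeaec"),
    ("repayBorrow", "0x0e752702"), ("repayBorrowBehalf", "0x2608f818"),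
    ("liquidateBorrow", "0xf5e3c462")]

def COMPOUND_V3_FUNCTIONS : PySem.Dict String String :=
  PySem.Dict.ofList [("supply", "0xf2b9fdb8"), ("withdraw", "0xf3fef3a3"),
    ("borrow", "0x4b8a3529"), ("repay", "0x1ededc91")]

def parse_compound_action (input_data : String) (contract_address : String) : Option String :=
  if PySem.Str.len input_data < 10 then none
  else
    let function_sig := PySem.Str.lower (PySem.Str.slice input_data none (some 10))
    if ((COMPOUND_V3_CONTRACTS.values.map PySem.Str.lower).contains
          (PySem.Str.lower contract_address)) then
      if function_sig == COMPOUND_V3_FUNCTIONS.getD "supply" "" then some "supply"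
      else if function_sig == COMPOUND_V3_FUNCTIONS.getD "withdraw" "" then some "withdraw"
      else if function_sig == COMPOUND_V3_FUNCTIONS.getD "borrow" "" then some "borrow"
      else if function_sig == COMPOUND_V3_FUNCTIONS.getD "repay" "" then some "repay"
      else none
    else
      if function_sig == COMPOUND_V2_FUNCTIONS.getD "mint" "" then some "supply"
      else if [COMPOUND_V2_FUNCTIONS.getD "redeem" "",
               COMPOUND_V2_FUNCTIONS.getD "redeemUnderlying" ""].contains function_sig then some "redeem"
      else if function_sig == COMPOUND_V2_FUNCTIONS.getD "borrow" "" then some "borrow"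
      else if [COMPOUND_V2_FUNCTIONS.getD "repayBorrow" "",
               COMPOUND_V2_FUNCTIONS.getD "repayBorrowBehalf" ""].contains function_sig then some "repay"
      else if function_sig == COMPOUND_V2_FUNCTIONS.getD "liquidateBorrow" "" then some "liquidation"
      else none

-- ===== PORT B =====
-- for name, selector in table.items(): if selector == sig: return name
def functionName (items : List (String × String)) (sig : String) : Option String :=
  match items with
  | [] => none
  | (name, selector) :: rest =>
      if selector == sig then some name else functionName rest sig

-- classify a V2 function name into an action
def v2Action (name : Option String) : Option String :=
  match name with
  | none => none
  | some name =>
      if name == "mint" then some "supply"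
      else if PySem.Str.startswith name "redeem" then some "redeem"
      else if PySem.Str.startswith name "repay" then some "repay"
      else if name == "liquidateBorrow" then some "liquidation"
      else some name

def parse_compound_action_alt (input_data : String) (contract_address : String) : Option String :=
  if PySem.Str.len input_data < 10 then none
  else
    let function_sig := PySem.Str.lower (PySem.Str.slice input_data none (some 10))
    if (COMPOUND_V3_CONTRACTS.values.any
          (fun addr => PySem.Str.lower addr == PySem.Str.lower contract_address)) then
      functionName (PySem.Dict.items COMPOUND_V3_FUNCTIONS) function_sig
    else
      v2Action (functionName (PySem.Dict.items COMPOUND_V2_FUNCTIONS) function_sig)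

-- ===== PRECONDITION & SPEC =====
def Spec_parse_compound_action (input_data : String) (contract_address : String) (out : Option String) : Prop := out = parse_compound_action_alt input_data contract_address
instance (input_data : String) (contract_address : String) (out : Option String) : Decidable (Spec_parse_compound_action input_data contract_address out) := by unfold Spec_parse_compound_action; infer_instance

-- ===== CLAIM (what is proved, stated in full; the proofs are below) =====
def Claim_equal_parse_compound_action : Prop := ∀ (input_data : String) (contract_address : String), Dom_parse_compound_action input_data contract_address → Spec_parse_compound_action input_data contract_address (parse_compound_action input_data contract_address)

-- ===== LEMMAS AND PROOFS =====

-- A's V3 elif chain equals B's reverse scan of the V3 table, for any selector string.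
lemma v3_chain_eq_scan (s : String) :
    (if s == COMPOUND_V3_FUNCTIONS.getD "supply" "" then some "supply"
     else if s == COMPOUND_V3_FUNCTIONS.getD "withdraw" "" then some "withdraw"
     else if s == COMPOUND_V3_FUNCTIONS.getD "borrow" "" then some "borrow"
     else if s == COMPOUND_V3_FUNCTIONS.getD "repay" "" then some "repay"
     else none) = functionName (PySem.Dict.items COMPOUND_V3_FUNCTIONS) s := by
  have e1 : COMPOUND_V3_FUNCTIONS.getD "supply" "" = "0xf2b9fdb8" := by decide
  have e2 : COMPOUND_V3_FUNCTIONS.getD "withdraw" "" = "0xf3fef3a3" := by decide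
  have e3 : COMPOUND_V3_FUNCTIONS.getD "borrow" "" = "0x4b8a3529" := by decide
  have e4 : COMPOUND_V3_FUNCTIONS.getD "repay" "" = "0x1ededc91" := by decide
  have hi : PySem.Dict.items COMPOUND_V3_FUNCTIONS
      = [("supply", "0xf2b9fdb8"), ("withdraw", "0xf3fef3a3"),
         ("borrow", "0x4b8a3529"), ("repay", "0x1ededc91")] := by decide
  rw [e1, e2, e3, e4, hi]
  simp only [functionName, beq_iff_eq]
  by_cases h1 : s = "0xf2b9fdb8" <;> by_cases h2 : s = "0xf3fef3a3" <;>
    by_cases h3 : s = "0x4b8a3529" <;> by_cases h4 : s = "0x1ededc91" <;>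
    simp_all [eq_comm]

-- A's V2 elif chain equals B's reverse scan + name classification, for any selector string.
lemma v2_chain_eq_scan (s : String) :
    (if s == COMPOUND_V2_FUNCTIONS.getD "mint" "" then some "supply"
     else if [COMPOUND_V2_FUNCTIONS.getD "redeem" "",
              COMPOUND_V2_FUNCTIONS.getD "redeemUnderlying" ""].contains s then some "redeem"
     else if s == COMPOUND_V2_FUNCTIONS.getD "borrow" "" then some "borrow"
     else if [COMPOUND_V2_FUNCTIONS.getD "repayBorrow" "",
              COMPOUND_V2_FUNCTIONS.getD "repayBorrowBehalf" ""].contains s then some "repay"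
     else if s == COMPOUND_V2_FUNCTIONS.getD "liquidateBorrow" "" then some "liquidation"
     else none)
    = v2Action (functionName (PySem.Dict.items COMPOUND_V2_FUNCTIONS) s) := by
  have e1 : COMPOUND_V2_FUNCTIONS.getD "mint" "" = "0xa0712d68" := by decide
  have e2 : COMPOUND_V2_FUNCTIONS.getD "redeem" "" = "0xdb006a75" := by decide
  have e3 : COMPOUND_V2_FUNCTIONS.getD "redeemUnderlying" "" = "0x852a12e3" := by decide
  have e4 : COMPOUND_V2_FUNCTIONS.getD "borrow" "" = "0xc5ebeaec" := by decide
  have e5 : COMPOUND_V2_FUNCTIONS.getD "repayBorrow" "" = "0x0e752702" := by decide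
  have e6 : COMPOUND_V2_FUNCTIONS.getD "repayBorrowBehalf" "" = "0x2608f818" := by decide
  have e7 : COMPOUND_V2_FUNCTIONS.getD "liquidateBorrow" "" = "0xf5e3c462" := by decide
  have hi : PySem.Dict.items COMPOUND_V2_FUNCTIONS
      = [("mint", "0xa0712d68"), ("redeem", "0xdb006a75"),
         ("redeemUnderlying", "0x852a12e3"), ("borrow", "0xc5ebeaec"),
         ("repayBorrow", "0x0e752702"), ("repayBorrowBehalf", "0x2608f818"),
         ("liquidateBorrow", "0xf5e3c462")] := by decide
  rw [e1, e2, e3, e4, e5, e6, e7, hi]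
  by_cases h1 : s = "0xa0712d68"; · subst h1; decide
  by_cases h2 : s = "0xdb006a75"; · subst h2; decide
  by_cases h3 : s = "0x852a12e3"; · subst h3; decide
  by_cases h4 : s = "0xc5ebeaec"; · subst h4; decide
  by_cases h5 : s = "0x0e752702"; · subst h5; decide
  by_cases h6 : s = "0x2608f818"; · subst h6; decide
  by_cases h7 : s = "0xf5e3c462"; · subst h7; decide
  simp only [functionName, v2Action, beq_iff_eq, List.contains_eq_mem, List.mem_cons,
    List.not_mem_nil, decide_eq_true_eq]
  simp [h1, h2, h3, h4, h5, h6, h7, eq_comm]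

-- Both programs test the same lowered-address membership over the same values.
lemma v3_cond_eq (c : String) :
    ((COMPOUND_V3_CONTRACTS.values.map PySem.Str.lower).contains (PySem.Str.lower c))
      = (COMPOUND_V3_CONTRACTS.values.any
          (fun addr => PySem.Str.lower addr == PySem.Str.lower c)) := by
  have hv : COMPOUND_V3_CONTRACTS.values = ["0xc3d688B66703497DAA19211EEdff47f25384cdc3"] := by
    decide
  rw [hv]
  simp only [List.map, List.contains, List.elem, List.any, Bool.or_false, List.elem_cons]
  cases h : PySem.Str.lower c == PySem.Str.lower "0xc3d688B66703497DAA19211EEdff47f25384cdc3"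
  · exact (decide_eq_false (fun e => beq_eq_false_iff_ne.mp h e.symm)).symm
  · exact (decide_eq_true ((beq_iff_eq).mp h).symm).symm

-- ===== VERDICT (by name: the statement is the Claim_ definition above) =====
theorem parse_compound_action_spec : Claim_equal_parse_compound_action := by
  intro input_data contract_address _
  unfold Spec_parse_compound_action parse_compound_action parse_compound_action_alt
  by_cases hlen : PySem.Str.len input_data < 10
  · rw [if_pos hlen, if_pos hlen]
  · rw [if_neg hlen, if_neg hlen]
    rw [v3_cond_eq]
    by_cases hv3 : (COMPOUND_V3_CONTRACTS.values.any
        (fun addr => PySem.Str.lower addr == PySem.Str.lower contract_address)) = true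
    · rw [if_pos hv3, if_pos hv3]; exact v3_chain_eq_scan _
    · rw [if_neg hv3, if_neg hv3]; exact v2_chain_eq_scan _
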